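-- pv_equiv track=rewrite | github.com/andylee024/farm | src/farm/cli.py | _log_has_ready_marker
-- ===== SOURCE A (Python) =====
-- def _log_has_ready_marker(lines: list[str]) -> bool:
--     markers = (
--         "ready for pr review",
--         "ready for review",
--         "ready for merge",
--     )
--     for raw in lines:
--         line = raw.lower()
--         if any(marker in line for marker in markers):
--             return True
--     return False
-- ===== SOURCE B (Python) =====
-- def _log_has_ready_marker(lines: list[str]) -> bool:
--     markers = (
--         "ready for pr review",
--         "ready for review",
--         "ready for merge",
--     )
--     text = "\n".join(lines).lower()
--     return any(marker in text for marker in markers)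
-- ===== Notes on version B (the rewrite author's own statement) =====
-- stated objective: faster
-- what changed: B joins all lines into one newline-separated blob, lowercases it once, and runs one substring scan per marker over that single string, instead of A's per-line loop that lowercases each line and tests every marker against it; since no marker contains a newline the join separator cannot create or hide matches.
import Mathlib
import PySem

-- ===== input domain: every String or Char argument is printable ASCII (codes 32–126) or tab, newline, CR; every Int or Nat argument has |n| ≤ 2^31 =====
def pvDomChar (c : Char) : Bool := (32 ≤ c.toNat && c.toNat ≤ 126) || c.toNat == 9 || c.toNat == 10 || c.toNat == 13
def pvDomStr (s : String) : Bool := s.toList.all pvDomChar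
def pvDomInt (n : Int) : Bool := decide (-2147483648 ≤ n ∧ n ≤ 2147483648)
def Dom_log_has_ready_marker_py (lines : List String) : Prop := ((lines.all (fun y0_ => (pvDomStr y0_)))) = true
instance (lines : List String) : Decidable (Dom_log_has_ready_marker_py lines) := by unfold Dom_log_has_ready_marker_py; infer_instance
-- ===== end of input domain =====

-- B joins the lines into one newline-separated lowercased blob and scans it once per marker,
-- instead of A's per-line loop; equivalent because no marker contains a newline (objective: alternative).

-- ===== PORT A =====
def pvMarkers : List String :=
  ["ready for pr review", "ready for review", "ready for merge"]

-- A's 'for raw in lines: … return True / return False' loop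
def pvALoop (lines : List String) : Bool :=
  match lines with
  | [] => false
  | raw :: rest =>
    let line := PySem.Str.lower raw
    if pvMarkers.any (fun marker => PySem.Str.isIn marker line) then true
    else pvALoop rest

def log_has_ready_marker_py (lines : List String) : Bool := pvALoop lines

-- ===== PORT B =====
def pvMarkersB : List String :=
  ["ready for pr review", "ready for review", "ready for merge"]

def log_has_ready_marker_py_alt (lines : List String) : Bool :=
  let text := PySem.Str.lower (PySem.Str.join "\n" lines)
  pvMarkersB.any (fun marker => PySem.Str.isIn marker text)

-- ===== PRECONDITION & SPEC =====
def Spec_log_has_ready_marker_py (lines : List String) (out : Bool) : Prop := out = log_has_ready_marker_py_alt lines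
instance (lines : List String) (out : Bool) : Decidable (Spec_log_has_ready_marker_py lines out) := by unfold Spec_log_has_ready_marker_py; infer_instance

-- ===== CLAIM (what is proved, stated in full; the proofs are below) =====
def Claim_equal_log_has_ready_marker_py : Prop := ∀ (lines : List String), Dom_log_has_ready_marker_py lines → Spec_log_has_ready_marker_py lines (log_has_ready_marker_py lines)

-- ===== LEMMAS AND PROOFS =====

-- An occurrence of t inside p ++ c :: s cannot straddle the separator c when c ∉ t.
theorem pv_infix_append_cons {t p s : List Char} {c : Char} (hc : c ∉ t)
    (h : t <:+: p ++ c :: s) : t <:+: p ∨ t <:+: s := by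
  obtain ⟨u, v, huv⟩ := h
  have hdrop : t ++ v = (p ++ c :: s).drop u.length := by
    rw [← huv, List.append_assoc, List.drop_left]
  by_cases h1 : u.length + t.length ≤ p.length
  · left
    have hle : u.length ≤ p.length := by omega
    rw [List.drop_append_of_le_length hle] at hdrop
    have ht : t = (p.drop u.length).take t.length := by
      have := congrArg (List.take t.length) hdrop
      rw [List.take_left' rfl, List.take_append_of_le_length (by simp; omega)] at this
      exact this
    rw [ht]
    exact ((List.take_prefix _ _).isInfix).trans (List.drop_suffix _ _).isInfix
  · by_cases h2 : p.length < u.length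
    · right
      rw [List.drop_append, List.drop_of_length_le (by omega), List.nil_append] at hdrop
      have hck : (c :: s).drop (u.length - p.length) = s.drop (u.length - p.length - 1) := by
        have hk : u.length - p.length = (u.length - p.length - 1) + 1 := by omega
        rw [hk]; rfl
      rw [hck] at hdrop
      have ht : t <+: s.drop (u.length - p.length - 1) := ⟨v, hdrop⟩
      exact ht.isInfix.trans (List.drop_suffix _ _).isInfix
    · exfalso
      apply hc
      have hlt : p.length < u.length + t.length := by omega
      have hge : u.length ≤ p.length := by omega
      have hidx : (u ++ t ++ v)[p.length]'(by rw [huv]; simp) = (p ++ c :: s)[p.length]'(by simp) := by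
        congr 1
      have hR : (p ++ c :: s)[p.length]'(by simp) = c := by
        rw [List.getElem_append_right (le_refl _)]; simp
      have hL : (u ++ t ++ v)[p.length]'(by rw [huv]; simp)
          = t[p.length - u.length]'(by omega) := by
        rw [List.getElem_append_left (by simp; omega), List.getElem_append_right hge]
      rw [hR, hL] at hidx
      rw [← hidx]
      exact List.getElem_mem _
  
-- A nonempty c-free t is a substring of the c-joined parts iff it is a substring of some part.
theorem pv_infix_intercalate {c : Char} {t : List Char} (hc : c ∉ t) (ht : t ≠ []) :
    ∀ parts : List (List Char), (t <:+: [c].intercalate parts ↔ ∃ p ∈ parts, t <:+: p) := by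
  intro parts
  induction parts with
  | nil => simp [List.intercalate, ht]
  | cons p rest ih =>
    cases rest with
    | nil => simp [List.intercalate]
    | cons q r =>
      have hcc : [c].intercalate (p :: q :: r) = p ++ c :: [c].intercalate (q :: r) := by
        simp [List.intercalate, List.intersperse]
      rw [hcc]
      constructor
      · intro h
        rcases pv_infix_append_cons hc h with h' | h'
        · exact ⟨p, by simp, h'⟩
        · rcases ih.mp h' with ⟨x, hx, hxt⟩
          exact ⟨x, by simp [hx], hxt⟩
      · rintro ⟨x, hx, hxt⟩
        rcases List.mem_cons.mp hx with rfl | hx'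
        · exact hxt.trans (List.prefix_append _ _).isInfix
        · have h1 : t <:+: [c].intercalate (q :: r) := ih.mpr ⟨x, hx', hxt⟩
          exact h1.trans ⟨p ++ [c], [], by simp⟩
  
-- lowercasing commutes with intercalation
theorem pv_map_intercalate (f : Char → Char) (sep : List Char) (parts : List (List Char)) :
    (sep.intercalate parts).map f = (sep.map f).intercalate (parts.map (List.map f)) := by
  induction parts with
  | nil => simp [List.intercalate]
  | cons p rest ih =>
    cases rest with
    | nil => simp [List.intercalate]
    | cons q r => simp [List.intercalate, List.intersperse] at *; simp [ih]

-- per-marker: searching the joined lowered text = searching each lowered line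
theorem pv_isIn_join (m : String) (hc : '\n' ∉ m.toList) (ht : m.toList ≠ []) (lines : List String) :
    PySem.Str.isIn m (PySem.Str.lower (PySem.Str.join "\n" lines))
      = lines.any (fun raw => PySem.Str.isIn m (PySem.Str.lower raw)) := by
  rw [Bool.eq_iff_iff]
  rw [PySem.Str.isIn_iff_infix, List.any_eq_true]
  have htext : (PySem.Str.lower (PySem.Str.join "\n" lines)).toList
      = List.intercalate ['\n'] (lines.map (fun s => PySem.Chars.lower s.toList)) := by
    rw [PySem.Str.toList_lower, PySem.Chars.lower, PySem.Str.toList_join]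
    have : ("\n" : String).toList = ['\n'] := rfl
    rw [this, PySem.Chars.join, pv_map_intercalate]
    simp [PySem.Chars.lower, Function.comp_def,
      show PySem.Chars.lowerChar '\n' = '\n' from by decide]
  rw [htext, pv_infix_intercalate hc ht]
  constructor
  · rintro ⟨p, hp, hpt⟩
    rcases List.mem_map.mp hp with ⟨raw, hraw, rfl⟩
    refine ⟨raw, hraw, ?_⟩
    rw [PySem.Str.isIn_iff_infix, PySem.Str.toList_lower]
    exact hpt
  · rintro ⟨raw, hraw, h⟩
    rw [PySem.Str.isIn_iff_infix, PySem.Str.toList_lower] at h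
    exact ⟨PySem.Chars.lower raw.toList, List.mem_map.mpr ⟨raw, hraw, rfl⟩, h⟩

-- A's early-return loop is List.any
theorem pv_aloop_eq_any (lines : List String) :
    pvALoop lines = lines.any (fun raw => pvMarkers.any (fun marker => PySem.Str.isIn marker (PySem.Str.lower raw))) := by
  induction lines with
  | nil => rfl
  | cons raw rest ih =>
    rw [pvALoop, List.any_cons, ← ih]
    cases pvMarkers.any (fun marker => PySem.Str.isIn marker (PySem.Str.lower raw)) <;> simp

-- disjunction distributes out of List.any
theorem pv_any_or (l : List String) (p q : String → Bool) :
    l.any (fun x => p x || q x) = (l.any p || l.any q) := by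
  induction l with
  | nil => rfl
  | cons a t ih => simp only [List.any_cons, ih]; cases p a <;> cases q a <;> simp

-- ===== VERDICT (by name: the statement is the Claim_ definition above) =====
theorem log_has_ready_marker_py_spec : Claim_equal_log_has_ready_marker_py := by
  intro lines _
  show log_has_ready_marker_py lines = log_has_ready_marker_py_alt lines
  rw [log_has_ready_marker_py, pv_aloop_eq_any, log_has_ready_marker_py_alt]
  simp only [pvMarkers, pvMarkersB, List.any_cons, List.any_nil, Bool.or_false]
  rw [pv_isIn_join "ready for pr review" (by decide) (by decide),
    pv_isIn_join "ready for review" (by decide) (by decide),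
    pv_isIn_join "ready for merge" (by decide) (by decide)]
  rw [pv_any_or, pv_any_or]
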